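-- pv_equiv track=rewrite | github.com/webszilla/work-zilla | apps/backend/website/views.py | _format_bank_details
-- ===== SOURCE A (Python) =====
-- def _format_bank_details(value):
--     raw = str(value or "").strip()
--     if not raw:
--         return ""
--     normalized = raw.replace("\r", "\n")
--     lines = []
--     for chunk in normalized.split("\n"):
--         if not chunk.strip():
--             continue
--         for part in chunk.split(","):
--             item = part.strip()
--             if item:
--                 lines.append(item)
--     return "\n".join(lines)
-- ===== SOURCE B (Python) =====
-- def _format_bank_details(value):
--     raw = str(value or "").strip()
--     out = []
--     cur = []
--     for ch in raw + "\n":  # sentinel delimiter flushes the last token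
--         if ch in ",\r\n":
--             item = "".join(cur).strip()
--             if item:
--                 out.append(item)
--             cur = []
--         else:
--             cur.append(ch)
--     return "\n".join(out)
-- ===== Notes on version B (the rewrite author's own statement) =====
-- stated objective: simpler
-- what changed: Replaces the replace-then-nested-split (newline split with a redundant blank-chunk skip, then a comma split per chunk) by a single left-to-right character scan that flushes the current token at every comma, carriage return or newline.
import Mathlib
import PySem

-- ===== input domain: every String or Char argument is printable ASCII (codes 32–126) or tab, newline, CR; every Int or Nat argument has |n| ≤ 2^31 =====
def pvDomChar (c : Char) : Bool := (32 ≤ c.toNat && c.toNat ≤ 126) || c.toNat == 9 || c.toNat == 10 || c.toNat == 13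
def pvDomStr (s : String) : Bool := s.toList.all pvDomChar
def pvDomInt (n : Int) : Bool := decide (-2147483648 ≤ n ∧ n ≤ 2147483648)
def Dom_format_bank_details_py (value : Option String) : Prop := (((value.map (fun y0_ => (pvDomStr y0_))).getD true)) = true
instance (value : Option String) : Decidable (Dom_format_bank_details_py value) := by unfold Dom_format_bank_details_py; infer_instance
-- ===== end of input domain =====

-- B replaces A's replace-then-nested-split by a single character scan that flushes the current token at every comma, carriage return or newline (simpler decomposition, same cost).

-- ===== PORT A =====
-- literal port of A, working on the string's character list via PySem.Chars (the Str wrappers are thin wrappers over these)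
def format_bank_details_py (value : Option String) : String :=
  let raw := PySem.Chars.strip (value.getD "").toList     -- str(value or "").strip()
  if raw = [] then ""
  else
    let normalized := PySem.Chars.replace raw ['\r'] ['\n']
    let lines := (PySem.Chars.splitOn normalized ['\n']).foldl
      (fun lines chunk =>
        if PySem.Chars.strip chunk = [] then lines        -- 'continue' on blank chunk
        else (PySem.Chars.splitOn chunk [',']).foldl
          (fun lines part =>
            let item := PySem.Chars.strip part
            if item ≠ [] then lines ++ [item] else lines) lines)
      []
    String.mk (PySem.Chars.join ['\n'] lines)

-- ===== PORT B =====
-- literal port of Source B: one pass over raw + "\n", flushing the current token at each delimiter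
def format_bank_details_py_alt (value : Option String) : String :=
  let raw := PySem.Chars.strip (value.getD "").toList
  let fin := (raw ++ ['\n']).foldl
    (fun (st : List (List Char) × List Char) (ch : Char) =>
      if ch = ',' || ch = '\r' || ch = '\n' then
        let item := PySem.Chars.strip st.2
        (if item = [] then st.1 else st.1 ++ [item], ([] : List Char))
      else (st.1, st.2 ++ [ch]))
    ([], [])
  String.mk (PySem.Chars.join ['\n'] fin.1)

-- ===== PRECONDITION & SPEC =====
def Spec_format_bank_details_py (value : Option String) (out : String) : Prop := out = format_bank_details_py_alt value
instance (value : Option String) (out : String) : Decidable (Spec_format_bank_details_py value out) := by unfold Spec_format_bank_details_py; infer_instance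

-- ===== CLAIM (what is proved, stated in full; the proofs are below) =====
def Claim_equal_format_bank_details_py : Prop := ∀ (value : Option String), Dom_format_bank_details_py value → Spec_format_bank_details_py value (format_bank_details_py value)

-- ===== LEMMAS AND PROOFS =====

-- split on the characters satisfying P, keeping the current (pre-accumulated) piece `cur`
def msplitP (P : Char → Bool) (cur : List Char) : List Char → List (List Char)
  | [] => [cur]
  | c :: rest => if P c then cur :: msplitP P [] rest else msplitP P (cur ++ [c]) rest

def flushT (cur : List Char) : List (List Char) :=
  if PySem.Chars.strip cur = [] then [] else [PySem.Chars.strip cur]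

-- the scanner of B, recursively
def colF (cur : List Char) : List Char → List (List Char)
  | [] => flushT cur
  | c :: rest => if c = ',' || c = '\r' || c = '\n' then flushT cur ++ colF [] rest else colF (cur ++ [c]) rest

lemma replace_go_single (d e : Char) :
    ∀ (l : List Char) (fuel : Nat) (acc : List Char), l.length ≤ fuel →
      PySem.Chars.replace.go [d] [e] fuel l acc
        = acc.reverse ++ l.map (fun c => if c = d then e else c) := by
  intro l
  induction l with
  | nil =>
    intro fuel acc _
    cases fuel <;> simp [PySem.Chars.replace.go]
  | cons c rest ih =>
    intro fuel acc hf
    cases fuel with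
    | zero => simp at hf
    | succ f =>
      by_cases hc : c = d
      · subst hc
        simp only [PySem.Chars.replace.go, List.isPrefixOf]
        simp [ih f (e :: acc) (by simpa using hf)]
      · simp only [PySem.Chars.replace.go, List.isPrefixOf]
        have hdc : (d == c) = false := by simp [Ne.symm hc]
        simp [hdc, ih f (c :: acc) (by simpa using hf), hc]

lemma replace_single (d e : Char) (l : List Char) :
    PySem.Chars.replace l [d] [e] = l.map (fun c => if c = d then e else c) := by
  simp [PySem.Chars.replace, replace_go_single d e l l.length _ le_rfl]

lemma splitOn_go_single (d : Char) :
    ∀ (l : List Char) (fuel : Nat) (cur : List Char) (acc : List (List Char)), l.length ≤ fuel →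
      PySem.Chars.splitOn.go [d] fuel l cur acc
        = acc.reverse ++ msplitP (fun c => c == d) cur.reverse l := by
  intro l
  induction l with
  | nil =>
    intro fuel acc _ _
    cases fuel <;> simp [PySem.Chars.splitOn.go, msplitP]
  | cons c rest ih =>
    intro fuel cur acc hf
    cases fuel with
    | zero => simp at hf
    | succ f =>
      by_cases hc : c = d
      · subst hc
        simp only [PySem.Chars.splitOn.go, List.isPrefixOf]
        simp [ih f [] (cur.reverse :: acc) (by simpa using hf), msplitP]
      · simp only [PySem.Chars.splitOn.go, List.isPrefixOf]
        have hdc : (d == c) = false := by simp [Ne.symm hc]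
        have hcd : (c == d) = false := by simp [hc]
        simp [hdc, ih f (c :: cur) acc (by simpa using hf), msplitP, hcd]

lemma splitOn_single (l : List Char) (d : Char) :
    PySem.Chars.splitOn l [d] = msplitP (fun c => c == d) [] l := by
  simpa using splitOn_go_single d l (l.length + 1) [] [] (by omega)

lemma msplitP_ne_nil (P : Char → Bool) : ∀ (l cur : List Char), msplitP P cur l ≠ [] := by
  intro l
  induction l with
  | nil => intro cur; simp [msplitP]
  | cons c rest ih =>
    intro cur
    by_cases h : P c = true <;> simp [msplitP, h, ih]

lemma msplitP_modifyHead (P : Char → Bool) :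
    ∀ (l cur : List Char), msplitP P cur l = (msplitP P [] l).modifyHead (cur ++ ·) := by
  intro l
  induction l with
  | nil => intro cur; simp [msplitP]
  | cons c rest ih =>
    intro cur
    by_cases h : P c = true
    · simp [msplitP, h]
    · simp only [msplitP, h, if_neg, Bool.not_eq_true, List.nil_append]
      rw [ih (cur ++ [c]), ih [c]]
      cases hs : msplitP P [] rest with
      | nil => exact absurd hs (msplitP_ne_nil P rest [])
      | cons hd tl => simp

lemma msplitP_two_stage (P1 P2 : Char → Bool) :
    ∀ (l : List Char),
      ((msplitP P1 [] l).map (msplitP P2 [])).flatten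
        = msplitP (fun c => P1 c || P2 c) [] l := by
  intro l
  induction l with
  | nil => simp [msplitP]
  | cons c rest ih =>
    by_cases h1 : P1 c = true
    · simp [msplitP, h1, ih]
    · rw [msplitP]
      simp only [h1, if_neg, Bool.not_eq_true, List.nil_append]
      rw [msplitP_modifyHead P1 rest [c]]
      cases hs : msplitP P1 [] rest with
      | nil => exact absurd hs (msplitP_ne_nil P1 rest [])
      | cons hd tl =>
        by_cases h2 : P2 c = true
        · have : msplitP P2 [] (c :: hd) = [] :: msplitP P2 [] hd := by simp [msplitP, h2]
          simp only [List.modifyHead, List.map_cons, List.flatten_cons, List.nil_append, List.singleton_append, this]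
          have ihx : msplitP P2 [] hd ++ (tl.map (msplitP P2 [])).flatten
              = msplitP (fun c => P1 c || P2 c) [] rest := by
            simpa [hs] using ih
          simp [msplitP, h1, h2, ← ihx]
        · obtain ⟨hd2, tl2, hs2⟩ : ∃ hd2 tl2, msplitP P2 [] hd = hd2 :: tl2 := by
            cases h' : msplitP P2 [] hd with
            | nil => exact absurd h' (msplitP_ne_nil P2 hd [])
            | cons a l => exact ⟨a, l, rfl⟩
          have hcons : msplitP P2 [] (c :: hd) = (c :: hd2) :: tl2 := by
            simp only [msplitP, h2, if_neg, Bool.not_eq_true, List.nil_append]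
            rw [msplitP_modifyHead P2 hd [c], hs2]
            simp
          have ihx : hd2 :: (tl2 ++ (List.map (msplitP P2 []) tl).flatten)
              = msplitP (fun c => P1 c || P2 c) [] rest := by
            have h' := ih
            rw [hs] at h'
            simpa [hs2] using h'
          have hrhs : msplitP (fun c => P1 c || P2 c) [] (c :: rest)
              = (msplitP (fun c => P1 c || P2 c) [] rest).modifyHead (fun x => [c] ++ x) := by
            have h1' : P1 c = false := by simpa using h1
            have h2' : P2 c = false := by simpa using h2
            simp only [msplitP, h1', h2', Bool.or_self, Bool.false_eq_true, if_false, List.nil_append]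
            exact msplitP_modifyHead _ rest [c]
          rw [List.modifyHead_cons, hrhs, ← ihx, List.modifyHead_cons]
          simp [hcons]

-- replacing '\r' by '\n' does not change the split on {',', '\r', '\n'}
lemma msplitP_map_cr (l : List Char) : ∀ (cur : List Char),
    msplitP (fun c => c = ',' || c = '\r' || c = '\n') cur l
      = msplitP (fun c => c == '\n' || c == ',') cur (l.map (fun c => if c = '\r' then '\n' else c)) := by
  induction l with
  | nil => intro cur; simp [msplitP]
  | cons c rest ih =>
    intro cur
    by_cases hr : c = '\r'
    · subst hr; simp [msplitP, ih]
    · by_cases hd : (c = ',' ∨ c = '\n')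
      · rcases hd with hd | hd <;> (subst hd; simp [msplitP, ih])
      · rw [not_or] at hd
        simp [msplitP, hr, hd.1, hd.2, ih]

lemma strip_eq_nil_iff (l : List Char) :
    PySem.Chars.strip l = [] ↔ ∀ c ∈ l, PySem.Chars.isspace c := by
  simp only [PySem.Chars.strip, PySem.Chars.rstrip, PySem.Chars.lstrip,
    List.reverse_eq_nil_iff, List.dropWhile_eq_nil_iff, List.mem_reverse]
  constructor
  · intro h c hc
    have hc' : c ∈ List.takeWhile PySem.Chars.isspace l ++ List.dropWhile PySem.Chars.isspace l := by
      rw [List.takeWhile_append_dropWhile]; exact hc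
    rcases List.mem_append.mp hc' with h' | h'
    · exact List.mem_takeWhile_imp h'
    · exact h c h'
  · intro h c hc
    exact h c ((List.dropWhile_sublist _).subset hc)

lemma mem_msplitP (P : Char → Bool) :
    ∀ (l cur p : List Char), p ∈ msplitP P cur l → ∀ c ∈ p, c ∈ cur ∨ c ∈ l := by
  intro l
  induction l with
  | nil =>
    intro cur p hp c hc
    simp [msplitP] at hp; subst hp; exact Or.inl hc
  | cons a rest ih =>
    intro cur p hp c hc
    by_cases h : P a = true
    · simp [msplitP, h] at hp
      rcases hp with hp | hp
      · subst hp; exact Or.inl hc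
      · rcases ih [] p hp c hc with h' | h'
        · simp at h'
        · exact Or.inr (List.mem_cons_of_mem _ h')
    · simp only [msplitP, h, if_neg, Bool.not_eq_true] at hp
      rcases ih (cur ++ [a]) p hp c hc with h' | h'
      · rcases List.mem_append.mp h' with h'' | h''
        · exact Or.inl h''
        · simp at h''; subst h''; exact Or.inr (List.mem_cons_self)
      · exact Or.inr (List.mem_cons_of_mem _ h')

lemma blank_chunk_parts (P : Char → Bool) (chunk : List Char)
    (h : PySem.Chars.strip chunk = []) :
    ((msplitP P [] chunk).map PySem.Chars.strip).filter (· ≠ []) = [] := by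
  rw [List.filter_eq_nil_iff]
  intro p hp
  simp only [List.mem_map] at hp
  obtain ⟨q, hq, rfl⟩ := hp
  have : PySem.Chars.strip q = [] := by
    rw [strip_eq_nil_iff]
    intro c hc
    rcases mem_msplitP P chunk [] q hq c hc with h' | h'
    · simp at h'
    · exact (strip_eq_nil_iff chunk).mp h c h'
  simp [this]

lemma colF_eq (l : List Char) : ∀ (cur : List Char),
    colF cur l = ((msplitP (fun c => c = ',' || c = '\r' || c = '\n') cur l).map PySem.Chars.strip).filter (· ≠ []) := by
  induction l with
  | nil =>
    intro cur
    by_cases hs : PySem.Chars.strip cur = [] <;> simp [colF, msplitP, flushT, hs]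
  | cons c rest ih =>
    intro cur
    by_cases h : (c = ',' || c = '\r' || c = '\n') = true
    · simp only [colF, msplitP, h, if_pos, List.map_cons, List.filter_cons, ih]
      unfold flushT
      by_cases hs : PySem.Chars.strip cur = [] <;> simp [hs]
    · simp only [colF, msplitP, h, if_neg, Bool.not_eq_true, ih]

lemma scan_foldl (l : List Char) : ∀ (out : List (List Char)) (cur : List Char),
    (l ++ ['\n']).foldl
      (fun (st : List (List Char) × List Char) (ch : Char) =>
        if ch = ',' || ch = '\r' || ch = '\n' then
          let item := PySem.Chars.strip st.2
          (if item = [] then st.1 else st.1 ++ [item], ([] : List Char))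
        else (st.1, st.2 ++ [ch]))
      (out, cur)
    = (out ++ colF cur l, []) := by
  induction l with
  | nil =>
    intro out cur
    by_cases hs : PySem.Chars.strip cur = [] <;> simp only [List.nil_append, List.foldl_cons,
      List.foldl_nil, colF, flushT, hs] <;> simp [hs]
  | cons c rest ih =>
    intro out cur
    rw [List.cons_append, List.foldl_cons]
    by_cases h : (c = ',' || c = '\r' || c = '\n') = true
    · by_cases hs : PySem.Chars.strip cur = []
      · simp only [h, if_true, hs, ite_true]
        rw [ih]
        simp [colF, h, flushT, hs]
      · simp only [h, if_true, hs, ite_false, if_neg]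
        rw [ih]
        simp [colF, h, flushT, hs]
    · simp only [h, if_false, Bool.not_eq_true]
      rw [ih]
      simp [colF, h]

lemma linesA_eq (raw : List Char) :
    (PySem.Chars.splitOn (PySem.Chars.replace raw ['\r'] ['\n']) ['\n']).foldl
      (fun lines chunk =>
        if PySem.Chars.strip chunk = [] then lines
        else (PySem.Chars.splitOn chunk [',']).foldl
          (fun lines part =>
            let item := PySem.Chars.strip part
            if item ≠ [] then lines ++ [item] else lines) lines)
      []
    = colF [] raw := by
  rw [replace_single, splitOn_single]
  have hinner : ∀ (parts : List (List Char)) (lines : List (List Char)),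
      parts.foldl (fun lines part => let item := PySem.Chars.strip part;
        if item ≠ [] then lines ++ [item] else lines) lines
      = lines ++ ((parts.map PySem.Chars.strip).filter (· ≠ [])) := by
    intro parts lines
    have h := PySem.List.foldl_append_if (fun part => decide (PySem.Chars.strip part ≠ []))
      PySem.Chars.strip parts lines
    simpa [List.filter_map, Function.comp] using h
  have hcongr := PySem.List.foldl_congr_mem
    (msplitP (fun c => c == '\n') [] (raw.map (fun c => if c = '\r' then '\n' else c)))
    (fun lines chunk =>
      if PySem.Chars.strip chunk = [] then lines
      else (PySem.Chars.splitOn chunk [',']).foldl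
        (fun lines part =>
          let item := PySem.Chars.strip part
          if item ≠ [] then lines ++ [item] else lines) lines)
    (fun lines chunk => lines ++ ((msplitP (fun c => c == ',') [] chunk).map PySem.Chars.strip).filter (· ≠ []))
    []
    (by
      intro acc chunk _
      beta_reduce
      by_cases hb : PySem.Chars.strip chunk = []
      · rw [if_pos hb, blank_chunk_parts _ _ hb]
        simp
      · rw [if_neg hb, splitOn_single, hinner])
  rw [hcongr, PySem.List.foldl_append_eq_flatMap, List.nil_append]
  rw [colF_eq, msplitP_map_cr raw [], ← msplitP_two_stage]
  simp [List.flatMap_def, List.map_flatten, List.filter_flatten, Function.comp_def]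

-- ===== VERDICT (by name: the statement is the Claim_ definition above) =====
theorem format_bank_details_py_spec : Claim_equal_format_bank_details_py := by
  intro value _
  unfold Spec_format_bank_details_py format_bank_details_py format_bank_details_py_alt
  dsimp only
  rw [scan_foldl]
  by_cases h0 : PySem.Chars.strip (value.getD "").toList = []
  · rw [if_pos h0, h0]
    rfl
  · rw [if_neg h0, linesA_eq]
    simp
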